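-- pv_equiv track=rewrite | github.com/SlivTime/aoc2021 | day13/python/run.py | fold_hor
-- ===== SOURCE A (Python) =====
-- def fold_hor(paper, fold_col):
--     new_paper = []
--     for row in paper:
--         new_row = row[:fold_col]
--         folded_row = row[fold_col + 1 :]
--         for folded_idx, val in enumerate(folded_row):
--             new_idx = fold_col - folded_idx - 1
--             if new_idx >= 0:
--                 new_val = val or new_row[new_idx]
--                 new_row[new_idx] = new_val
--         new_paper.append(new_row)
--     return new_paper
-- ===== SOURCE B (Python) =====
-- def fold_hor(paper, fold_col):
--     # Gather directly from the original row by mirror-index arithmetic: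
--     # output cell i takes row[2*fold_col - i] (the mirrored right cell) OR row[i].
--     return [
--         [
--             (row[2 * fold_col - i] if i < fold_col and 2 * fold_col - i < len(row) else 0)
--             or row[i]
--             for i in range(len(row[:fold_col]))
--         ]
--         for row in paper
--     ]
-- ===== Notes on version B (the rewrite author's own statement) =====
-- stated objective: alternative
-- what changed: B never splits the row or mutates a buffer: it computes each output cell directly from the original row by closed-form mirror-index arithmetic (row[2*fold_col - i] or row[i]), whereas A slices the row into two halves and scatters the right half into a mutable copy of the left half.
import Mathlib
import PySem

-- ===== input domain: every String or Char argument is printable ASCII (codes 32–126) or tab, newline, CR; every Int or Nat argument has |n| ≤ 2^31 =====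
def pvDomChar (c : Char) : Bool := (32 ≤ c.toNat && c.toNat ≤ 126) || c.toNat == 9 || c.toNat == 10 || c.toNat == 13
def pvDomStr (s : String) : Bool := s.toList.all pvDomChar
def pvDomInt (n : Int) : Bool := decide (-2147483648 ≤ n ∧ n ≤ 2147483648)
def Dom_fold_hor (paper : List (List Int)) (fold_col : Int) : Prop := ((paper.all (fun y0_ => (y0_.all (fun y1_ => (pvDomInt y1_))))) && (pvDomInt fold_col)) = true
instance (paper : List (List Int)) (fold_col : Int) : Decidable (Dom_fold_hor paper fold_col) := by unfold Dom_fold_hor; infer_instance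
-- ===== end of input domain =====

-- B computes each output cell directly from the original row by mirror-index
-- arithmetic (row[2*fold_col - i] or row[i]) instead of A's slice-and-scatter
-- into a mutable buffer; same return value, no speed claim.

-- ===== PORT A =====
def fold_hor (paper : List (List Int)) (fold_col : Int) : List (List Int) :=
  paper.foldl (fun new_paper row =>
    let new_row0 := PySem.List.slice row none (some fold_col)
    let folded_row := PySem.List.slice row (some (fold_col + 1)) none
    let new_row := (PySem.List.enumerate folded_row 0).foldl (fun nr fi =>
      let new_idx := fold_col - fi.1 - 1
      if 0 ≤ new_idx then
        PySem.List.pySetD nr new_idx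
          (if fi.2 ≠ 0 then fi.2 else PySem.List.pyGetD nr new_idx 0)
      else nr) new_row0
    new_paper ++ [new_row]) []

-- ===== PORT B =====
def fold_hor_alt (paper : List (List Int)) (fold_col : Int) : List (List Int) :=
  paper.map (fun row =>
    (List.range (PySem.List.slice row none (some fold_col)).length).map (fun (i : Nat) =>
      let v : Int :=
        if (i : Int) < fold_col ∧ 2 * fold_col - (i : Int) < (row.length : Int) then
          PySem.List.pyGetD row (2 * fold_col - (i : Int)) 0
        else 0
      if v ≠ 0 then v else PySem.List.pyGetD row (i : Int) 0))

-- ===== PRECONDITION & SPEC =====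
def Spec_fold_hor (paper : List (List Int)) (fold_col : Int) (out : List (List Int)) : Prop := out = fold_hor_alt paper fold_col
instance (paper : List (List Int)) (fold_col : Int) (out : List (List Int)) : Decidable (Spec_fold_hor paper fold_col out) := by unfold Spec_fold_hor; infer_instance

-- ===== CLAIM (what is proved, stated in full; the proofs are below) =====
def Claim_equal_fold_hor : Prop := ∀ (paper : List (List Int)) (fold_col : Int), Dom_fold_hor paper fold_col → Spec_fold_hor paper fold_col (fold_hor paper fold_col)

-- ===== LEMMAS AND PROOFS =====

-- reading every position of a list back in order rebuilds the list
lemma map_pyGetD_range {α : Type} (l : List α) (d : α) :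
    (List.range l.length).map (fun (i : Nat) => PySem.List.pyGetD l (i : Int) d) = l := by
  apply List.ext_getElem
  · simp
  · intro i h1 h2
    simp only [List.getElem_map, List.getElem_range, PySem.List.pyGetD_natCast]
    rw [List.getD_eq_getElem?_getD, List.getElem?_eq_getElem h2]
    rfl

lemma pyGetD_cons_of_pos {α : Type} (v : α) (vs : List α) (t : Int) (d : α) (ht : 0 < t) :
    PySem.List.pyGetD (v :: vs) t d = PySem.List.pyGetD vs (t - 1) d := by
  obtain ⟨n, rfl⟩ : ∃ n : Nat, t = (n : Int) + 1 := ⟨(t - 1).toNat, by omega⟩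
  rw [show ((n : Int) + 1) = ((n + 1 : Nat) : Int) by push_cast; ring,
      show ((n + 1 : Nat) : Int) - 1 = (n : Int) by push_cast; ring,
      PySem.List.pyGetD_natCast, PySem.List.pyGetD_natCast]
  simp [List.getD]

-- characterisation of A's scatter loop: the final buffer, read position by position
lemma loop_char (fc : Int) (vals : List Int) : ∀ (s : Int) (nr : List Int),
    (PySem.List.enumerate vals s).foldl (fun nr fi =>
        let new_idx := fc - fi.1 - 1
        if 0 ≤ new_idx then
          PySem.List.pySetD nr new_idx
            (if fi.2 ≠ 0 then fi.2 else PySem.List.pyGetD nr new_idx 0)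
        else nr) nr
      = (List.range nr.length).map (fun (i : Nat) =>
          if 0 ≤ fc - 1 - (i : Int) - s ∧ fc - 1 - (i : Int) - s < (vals.length : Int) then
            (if PySem.List.pyGetD vals (fc - 1 - (i : Int) - s) 0 ≠ 0 then
               PySem.List.pyGetD vals (fc - 1 - (i : Int) - s) 0
             else PySem.List.pyGetD nr (i : Int) 0)
          else PySem.List.pyGetD nr (i : Int) 0) := by
  induction vals with
  | nil =>
    intro s nr
    simp only [PySem.List.enumerate_nil, List.foldl_nil]
    conv_lhs => rw [← map_pyGetD_range nr 0]
    apply List.map_congr_left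
    intro i _
    rw [if_neg (by simp only [List.length_nil]; push_cast; omega)]
  | cons v vs ih =>
    intro s nr
    rw [PySem.List.enumerate_cons, List.foldl_cons]
    simp only
    by_cases hw : 0 ≤ fc - s - 1
    · rw [if_pos hw]
      obtain ⟨w, hwn⟩ : ∃ w : Nat, fc - s - 1 = (w : Int) := ⟨(fc - s - 1).toNat, by omega⟩
      rw [hwn, PySem.List.pySetD_natCast, ih]
      rw [List.length_set]
      apply List.map_congr_left
      intro i hi
      rw [List.mem_range] at hi
      have hget : ∀ m : Nat, m < nr.length →
          PySem.List.pyGetD (nr.set w (if v ≠ 0 then v else PySem.List.pyGetD nr (w : Int) 0)) (m : Int) 0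
            = if m = w then (if v ≠ 0 then v else PySem.List.pyGetD nr (w : Int) 0)
              else PySem.List.pyGetD nr (m : Int) 0 := by
        intro m hm
        rw [PySem.List.pyGetD_natCast, PySem.List.pyGetD_natCast,
            List.getD_eq_getElem?_getD, List.getD_eq_getElem?_getD,
            List.getElem?_set]
        by_cases hmw : w = m
        · subst hmw
          by_cases hwl : w < nr.length
          · simp [hwl]
          · omega
        · simp [hmw, Ne.symm hmw]
      have hv0 : PySem.List.pyGetD (v :: vs) (0 : Int) 0 = v := by
        rw [show (0 : Int) = ((0 : Nat) : Int) from rfl, PySem.List.pyGetD_natCast]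
        rfl
      by_cases h0 : fc - 1 - (i : Int) - s = 0
      · -- the position written in this step
        have hiw : i = w := by omega
        subst hiw
        have h1 : ¬(0 ≤ fc - 1 - (i : Int) - (s + 1) ∧ fc - 1 - (i : Int) - (s + 1) < (vs.length : Int)) := by
          omega
        have h2 : 0 ≤ fc - 1 - (i : Int) - s ∧ fc - 1 - (i : Int) - s < ((v :: vs).length : Int) := by
          simp only [List.length_cons]; push_cast; omega
        rw [if_neg h1, hget i hi, if_pos rfl, if_pos h2, h0, hv0]
      · have hne : ¬ i = w := by omega
        by_cases hin : 0 ≤ fc - 1 - (i : Int) - s ∧ fc - 1 - (i : Int) - s < ((v :: vs).length : Int)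
        · have ht : 0 < fc - 1 - (i : Int) - s := by omega
          have hc : 0 ≤ fc - 1 - (i : Int) - (s + 1) ∧ fc - 1 - (i : Int) - (s + 1) < (vs.length : Int) := by
            simp only [List.length_cons] at hin; push_cast at hin ⊢; omega
          rw [if_pos hc, if_pos hin, hget i hi, if_neg hne,
              pyGetD_cons_of_pos v vs _ 0 ht,
              show fc - 1 - (i : Int) - (s + 1) = fc - 1 - (i : Int) - s - 1 by ring]
        · have h1 : ¬(0 ≤ fc - 1 - (i : Int) - (s + 1) ∧ fc - 1 - (i : Int) - (s + 1) < (vs.length : Int)) := by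
            simp only [List.length_cons] at hin; push_cast at hin ⊢; omega
          rw [if_neg h1, hget i hi, if_neg hne, if_neg hin]
    · rw [if_neg hw, ih]
      apply List.map_congr_left
      intro i _
      rw [if_neg (by omega), if_neg (by simp only [List.length_cons]; push_cast; omega)]

-- the prefix slice row[:fc] reads back as the row itself on its indices
lemma left_get (row : List Int) (fc : Int) (i : Nat)
    (hi : i < (PySem.List.slice row none (some fc)).length) :
    PySem.List.pyGetD (PySem.List.slice row none (some fc)) (i : Int) 0
      = PySem.List.pyGetD row (i : Int) 0 := by
  have key : ∀ m : Nat, i < (List.take m row).length →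
      PySem.List.pyGetD (List.take m row) (i : Int) 0 = PySem.List.pyGetD row (i : Int) 0 := by
    intro m hm
    rw [List.length_take] at hm
    rw [PySem.List.pyGetD_natCast, PySem.List.pyGetD_natCast,
        List.getD_eq_getElem?_getD, List.getD_eq_getElem?_getD, List.getElem?_take]
    rw [if_pos (by omega)]
  by_cases hfc : 0 ≤ fc
  · rw [PySem.List.slice_to row hfc] at hi ⊢
    exact key _ hi
  · obtain ⟨k, hk, rfl⟩ : ∃ k : Nat, 0 < k ∧ fc = -(k : Int) :=
      ⟨(-fc).toNat, by omega, by omega⟩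
    rw [PySem.List.slice_to_neg_natCast row k hk] at hi ⊢
    exact key _ hi

-- the two per-row computations agree
lemma row_eq (fc : Int) (row : List Int) :
    (PySem.List.enumerate (PySem.List.slice row (some (fc + 1)) none) 0).foldl (fun nr fi =>
        let new_idx := fc - fi.1 - 1
        if 0 ≤ new_idx then
          PySem.List.pySetD nr new_idx
            (if fi.2 ≠ 0 then fi.2 else PySem.List.pyGetD nr new_idx 0)
        else nr) (PySem.List.slice row none (some fc))
      = (List.range (PySem.List.slice row none (some fc)).length).map (fun (i : Nat) =>
          let v : Int :=
            if (i : Int) < fc ∧ 2 * fc - (i : Int) < (row.length : Int) then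
              PySem.List.pyGetD row (2 * fc - (i : Int)) 0
            else 0
          if v ≠ 0 then v else PySem.List.pyGetD row (i : Int) 0) := by
  rw [loop_char]
  simp only [sub_zero]
  apply List.map_congr_left
  intro i hi
  rw [List.mem_range] at hi
  rw [left_get row fc i hi]
  by_cases hfc : 0 < fc
  · -- right half really exists
    have hR : PySem.List.slice row (some (fc + 1)) none = row.drop (fc + 1).toNat :=
      PySem.List.slice_from row (by omega)
    have hL : PySem.List.slice row none (some fc) = row.take fc.toNat :=
      PySem.List.slice_to row (by omega)
    have hifc : (i : Int) < fc := by
      rw [hL, List.length_take] at hi; omega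
    have hlenR : ((PySem.List.slice row (some (fc + 1)) none).length : Int)
        = (row.length : Int) - min ((fc + 1).toNat : Int) (row.length : Int) := by
      rw [hR, List.length_drop]; omega
    have hcond : (0 ≤ fc - 1 - (i : Int) ∧
        fc - 1 - (i : Int) < ((PySem.List.slice row (some (fc + 1)) none).length : Int))
        ↔ ((i : Int) < fc ∧ 2 * fc - (i : Int) < (row.length : Int)) := by
      rw [hlenR]; omega
    by_cases hc : (i : Int) < fc ∧ 2 * fc - (i : Int) < (row.length : Int)
    · rw [if_pos (hcond.mpr hc), if_pos hc]
      have hval : PySem.List.pyGetD (PySem.List.slice row (some (fc + 1)) none) (fc - 1 - (i : Int)) 0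
          = PySem.List.pyGetD row (2 * fc - (i : Int)) 0 := by
        obtain ⟨j, hj⟩ : ∃ j : Nat, fc - 1 - (i : Int) = (j : Int) := ⟨(fc - 1 - (i : Int)).toNat, by omega⟩
        have h2 : 2 * fc - (i : Int) = (((fc + 1).toNat + j : Nat) : Int) := by push_cast; omega
        rw [hj, h2, hR, PySem.List.pyGetD_natCast, PySem.List.pyGetD_natCast,
            List.getD_eq_getElem?_getD, List.getD_eq_getElem?_getD, List.getElem?_drop]
      rw [hval]
    · rw [if_neg (fun h => hc (hcond.mp h)), if_neg hc, if_neg (by simp)]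
  · -- fold column ≤ 0: nothing is ever folded onto the left part
    rw [if_neg (by omega), if_neg (by omega)]

-- ===== VERDICT (by name: the statement is the Claim_ definition above) =====
theorem fold_hor_spec : Claim_equal_fold_hor := by
  intro paper fold_col _
  unfold Spec_fold_hor fold_hor fold_hor_alt
  rw [PySem.List.foldl_append_singleton_eq_map]
  rw [List.nil_append]
  apply List.map_congr_left
  intro row _
  simp only
  exact row_eq fold_col row
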